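-- pv_equiv track=rewrite | github.com/rajennparekh/game-thesis | mnk_transformer/train_function.py | get_num_params_old
-- ===== SOURCE A (Python) =====
-- def get_num_params_old(m, n, num_layer, num_embed, mlp_layer_mult, exclude=True):
--     block_size = m * n + 1
--     vocab_size = m * n + 2
--     sum = 0
--     if not exclude: # These will always be excluded
--         sum = sum + vocab_size * num_embed # Word token embedding
--         sum = sum + block_size * num_embed # Word position embedding
--     for _ in range(num_layer): # For each layer...
--         sum = sum + num_embed # LayerNorm
--         sum = sum + 3 * num_embed * num_embed # SelfAttention weight matrix
--         sum = sum + num_embed * num_embed # SelfAttention c_proj matrix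
--         sum = sum + num_embed # LayerNorm
--         sum = sum + num_embed * mlp_layer_mult * num_embed # MLP weights
--         sum = sum + mlp_layer_mult * num_embed * num_embed # MLP weights
--     sum = sum + num_embed # LayerNorm
--     sum = sum + num_embed * vocab_size # Linear layer
--     return sum
-- ===== SOURCE B (Python) =====
-- def get_num_params_old(m, n, num_layer, num_embed, mlp_layer_mult, exclude=True):
--     # Closed form: multiply the per-layer parameter count by the number of layers.
--     vocab_size = m * n + 2
--     per_layer = 2 * num_embed + (4 + 2 * mlp_layer_mult) * num_embed * num_embed
--     total = max(num_layer, 0) * per_layer + num_embed + num_embed * vocab_size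
--     if not exclude:
--         total += vocab_size * num_embed + (m * n + 1) * num_embed
--     return total
-- ===== Notes on version B (the rewrite author's own statement) =====
-- stated objective: faster
-- what changed: Replaced the per-layer accumulation loop with a closed-form product of the per-layer parameter count and the number of layers.
import Mathlib
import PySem

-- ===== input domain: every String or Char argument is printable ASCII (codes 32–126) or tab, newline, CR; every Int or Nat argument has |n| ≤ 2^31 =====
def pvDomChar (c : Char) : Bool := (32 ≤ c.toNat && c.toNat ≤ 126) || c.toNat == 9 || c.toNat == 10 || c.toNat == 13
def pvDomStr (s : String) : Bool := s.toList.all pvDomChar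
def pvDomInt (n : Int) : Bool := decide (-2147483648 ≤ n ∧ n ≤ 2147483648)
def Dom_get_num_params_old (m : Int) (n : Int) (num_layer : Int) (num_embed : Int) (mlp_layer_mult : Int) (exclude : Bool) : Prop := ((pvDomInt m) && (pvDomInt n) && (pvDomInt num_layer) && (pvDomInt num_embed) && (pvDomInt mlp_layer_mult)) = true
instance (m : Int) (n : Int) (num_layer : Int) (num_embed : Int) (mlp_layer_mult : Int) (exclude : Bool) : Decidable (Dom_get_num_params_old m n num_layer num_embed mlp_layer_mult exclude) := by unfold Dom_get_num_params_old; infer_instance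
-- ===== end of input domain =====

-- ===== PORT A =====
-- B replaces A's per-layer loop by a closed-form product (objective: faster).
def get_num_params_old (m : Int) (n : Int) (num_layer : Int) (num_embed : Int) (mlp_layer_mult : Int) (exclude : Bool) : Int :=
  let block_size := m * n + 1
  let vocab_size := m * n + 2
  let sum0 : Int := 0
  let sum1 := if !exclude then sum0 + vocab_size * num_embed + block_size * num_embed else sum0
  let sum2 := (PySem.List.pyRange 0 num_layer 1).foldl
    (fun s _ => s + num_embed + 3 * num_embed * num_embed + num_embed * num_embed
      + num_embed + num_embed * mlp_layer_mult * num_embed + mlp_layer_mult * num_embed * num_embed) sum1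
  sum2 + num_embed + num_embed * vocab_size

-- ===== PORT B =====
def get_num_params_old_alt (m : Int) (n : Int) (num_layer : Int) (num_embed : Int) (mlp_layer_mult : Int) (exclude : Bool) : Int :=
  let vocab_size := m * n + 2
  let per_layer := 2 * num_embed + (4 + 2 * mlp_layer_mult) * num_embed * num_embed
  let total := max num_layer 0 * per_layer + num_embed + num_embed * vocab_size
  if !exclude then total + (vocab_size * num_embed + (m * n + 1) * num_embed) else total

-- ===== PRECONDITION & SPEC =====
def Spec_get_num_params_old (m : Int) (n : Int) (num_layer : Int) (num_embed : Int) (mlp_layer_mult : Int) (exclude : Bool) (out : Int) : Prop := out = get_num_params_old_alt m n num_layer num_embed mlp_layer_mult exclude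
instance (m : Int) (n : Int) (num_layer : Int) (num_embed : Int) (mlp_layer_mult : Int) (exclude : Bool) (out : Int) : Decidable (Spec_get_num_params_old m n num_layer num_embed mlp_layer_mult exclude out) := by unfold Spec_get_num_params_old; infer_instance

-- ===== CLAIM (what is proved, stated in full; the proofs are below) =====
def Claim_equal_get_num_params_old : Prop := ∀ (m : Int) (n : Int) (num_layer : Int) (num_embed : Int) (mlp_layer_mult : Int) (exclude : Bool), Dom_get_num_params_old m n num_layer num_embed mlp_layer_mult exclude → Spec_get_num_params_old m n num_layer num_embed mlp_layer_mult exclude (get_num_params_old m n num_layer num_embed mlp_layer_mult exclude)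

-- ===== LEMMAS AND PROOFS =====

-- ===== VERDICT (by name: the statement is the Claim_ definition above) =====
-- a constant-body loop adds length * constant
theorem foldl_const_add (c : Int) (l : List Int) (s : Int) :
    l.foldl (fun s _ => s + c) s = s + l.length * c := by
  induction l generalizing s with
  | nil => simp
  | cons x xs ih => simp [List.foldl, ih]; ring

theorem get_num_params_old_spec : Claim_equal_get_num_params_old := by
  intro m n num_layer num_embed mlp_layer_mult exclude _
  unfold Spec_get_num_params_old get_num_params_old get_num_params_old_alt
  have hb : (fun (s : Int) (_ : Int) => s + num_embed + 3 * num_embed * num_embed + num_embed * num_embed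
      + num_embed + num_embed * mlp_layer_mult * num_embed + mlp_layer_mult * num_embed * num_embed)
      = fun s _ => s + (2 * num_embed + 4 * num_embed * num_embed + 2 * mlp_layer_mult * num_embed * num_embed) := by
    funext s x; ring
  simp only [hb, foldl_const_add, PySem.List.length_pyRange_one]
  rw [show (((num_layer - 0).toNat : Int)) = max num_layer 0 by omega]
  cases exclude <;> simp only [Bool.not_true, Bool.not_false, if_true, if_false,
    Bool.false_eq_true, Bool.true_eq_false, ite_true, ite_false, reduceIte] <;> ring
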